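-- pv_equiv track=rewrite | github.com/ChanukyaVardhan/DL_Competition | utils.py | get_closest_object
-- ===== SOURCE A (Python) =====
-- def get_class_ids(id):
--     if id == 0:
--         raise Exception("Background has no class id tuple")
--     else:
--         id -= 1
--         s_id = id // 16
--         id = id % 16
--         m_id = id // 8
--         id = id % 8
--         c_id = id
--
--         return s_id, m_id, c_id
--
-- def get_closest_object(k, known_ids):
--     new_class_data = get_class_ids(k)   # Shape, Material, Color
--     # List of Shape, Material, Color
--     known_class_data = [get_class_ids(i) for i in known_ids]
--
--     # Check if there is a known object with same shape and color but different material
--     priorities = []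
--     for i, class_data in enumerate(known_class_data):
--         priority = 0
--         priority += (class_data[0] != new_class_data[0]
--                      ) * 2    # Different shape
--         priority += (class_data[1] != new_class_data[1]
--                      ) * 1    # Different material
--         priority += (class_data[2] != new_class_data[2]
--                      ) * 4    # Different color
--         priorities.append((priority, i))
--
--     priorities.sort()
--
--     return known_ids[priorities[0][1]]
-- ===== SOURCE B (Python) =====
-- def get_class_ids(id):
--     if id == 0:
--         raise Exception("Background has no class id tuple")
--     else:
--         id -= 1
--         s_id = id // 16
--         id = id % 16
--         m_id = id // 8
--         id = id % 8
--         c_id = id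
--
--         return s_id, m_id, c_id
--
-- def get_closest_object(k, known_ids):
--     s, m, c = get_class_ids(k)
--
--     def priority(i):
--         s_i, m_i, c_i = get_class_ids(i)
--         return 4 * (c_i != c) + 2 * (s_i != s) + (m_i != m)
--
--     return min(known_ids, key=priority)
-- ===== Notes on version B (the rewrite author's own statement) =====
-- stated objective: simpler
-- what changed: B replaces A's enumerate/priority-list/sort/index-back pipeline by a single min() over known_ids with a priority key (Python's min returns the first minimal element, matching A's stable-sort smallest-index tie-break); avoiding the sort makes it O(n) instead of O(n log n).
import Mathlib
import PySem

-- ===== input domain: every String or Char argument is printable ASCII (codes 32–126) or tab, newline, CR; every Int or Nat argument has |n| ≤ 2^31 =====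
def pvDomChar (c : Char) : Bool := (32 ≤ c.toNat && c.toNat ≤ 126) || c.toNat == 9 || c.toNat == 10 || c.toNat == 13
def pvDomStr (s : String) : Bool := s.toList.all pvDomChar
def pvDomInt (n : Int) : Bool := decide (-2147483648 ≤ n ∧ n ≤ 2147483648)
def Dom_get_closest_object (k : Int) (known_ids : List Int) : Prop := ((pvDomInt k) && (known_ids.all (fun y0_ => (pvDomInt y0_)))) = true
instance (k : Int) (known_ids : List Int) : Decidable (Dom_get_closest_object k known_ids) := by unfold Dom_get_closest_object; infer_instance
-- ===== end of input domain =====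

-- B replaces A's enumerate/priority-list/sort/index-back pipeline by a single first-minimum
-- pass with a priority key (objective: simpler). Return-value equivalence only; neither mutates.

-- ===== PORT A =====
-- get_class_ids: the 'raise' at id == 0 is excluded by Pre_; on id ≠ 0 this is exact
-- (PySem.Int.floordiv/mod are Python's floor division and modulo).
def pvGetClassIds (id : Int) : Int × Int × Int :=
  let id1 := id - 1
  let s_id := PySem.Int.floordiv id1 16
  let id2 := PySem.Int.mod id1 16
  let m_id := PySem.Int.floordiv id2 8
  let id3 := PySem.Int.mod id2 8
  (s_id, m_id, id3)

-- the 'none' branches are Python's IndexError on empty known_ids, excluded by Pre_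
def get_closest_object (k : Int) (known_ids : List Int) : Int :=
  let new_class_data := pvGetClassIds k
  let known_class_data := known_ids.map (fun i => pvGetClassIds i)
  let priorities : List (Int × Int) :=
    (PySem.List.enumerate known_class_data 0).foldl (fun acc p =>
      let priority : Int := 0
      let priority := priority + (if p.2.1 ≠ new_class_data.1 then (1:Int) else 0) * 2
      let priority := priority + (if p.2.2.1 ≠ new_class_data.2.1 then (1:Int) else 0) * 1
      let priority := priority + (if p.2.2.2 ≠ new_class_data.2.2 then (1:Int) else 0) * 4
      acc ++ [(priority, p.1)]) []
  let sortedP := PySem.List.sorted2 priorities (fun q => q.1) (fun q => q.2)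
  match PySem.List.pyGet? sortedP 0 with
  | some q =>
    match PySem.List.pyGet? known_ids q.2 with
    | some v => v
    | none => 0
  | none => 0

-- ===== PORT B =====
def pvPriorityB (new : Int × Int × Int) (i : Int) : Int :=
  let cd := pvGetClassIds i
  4 * (if cd.2.2 ≠ new.2.2 then (1:Int) else 0)
    + 2 * (if cd.1 ≠ new.1 then (1:Int) else 0)
    + (if cd.2.1 ≠ new.2.1 then (1:Int) else 0)

-- the 'none' branch is Python's ValueError of min() on empty known_ids, excluded by Pre_
def get_closest_object_alt (k : Int) (known_ids : List Int) : Int :=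
  let new := pvGetClassIds k
  match PySem.List.min? known_ids (pvPriorityB new) with
  | some v => v
  | none => 0

-- ===== PRECONDITION & SPEC =====
-- Pre_ excludes exactly the inputs where the Python A raises: k = 0 or 0 ∈ known_ids
-- (get_class_ids raises Exception) and empty known_ids (IndexError).
def Pre_get_closest_object (k : Int) (known_ids : List Int) : Prop :=
  k ≠ 0 ∧ known_ids ≠ [] ∧ (0:Int) ∉ known_ids
instance (k : Int) (known_ids : List Int) : Decidable (Pre_get_closest_object k known_ids) := by
  unfold Pre_get_closest_object; infer_instance
def pvWitness_get_closest_object : Int × List Int := (1, [2])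
def Spec_get_closest_object (k : Int) (known_ids : List Int) (out : Int) : Prop := out = get_closest_object_alt k known_ids
instance (k : Int) (known_ids : List Int) (out : Int) : Decidable (Spec_get_closest_object k known_ids out) := by unfold Spec_get_closest_object; infer_instance

-- ===== CLAIM (what is proved, stated in full; the proofs are below) =====
def Claim_equal_get_closest_object : Prop := ∀ (k : Int) (known_ids : List Int), Dom_get_closest_object k known_ids → Pre_get_closest_object k known_ids → Spec_get_closest_object k known_ids (get_closest_object k known_ids)

-- ===== LEMMAS AND PROOFS =====

-- Python's lexicographic '<' on the (priority, index) pairs, as sorted2 compares them.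
def pvLt (a b : Int × Int) : Bool :=
  decide (a.1 < b.1) || (!decide (b.1 < a.1) && decide (a.2 < b.2))

-- A's and B's priority expressions agree.
theorem pvPriority_eq (new cd : Int × Int × Int) :
    0 + (if cd.1 ≠ new.1 then (1:Int) else 0) * 2
      + (if cd.2.1 ≠ new.2.1 then (1:Int) else 0) * 1
      + (if cd.2.2 ≠ new.2.2 then (1:Int) else 0) * 4
    = 4 * (if cd.2.2 ≠ new.2.2 then (1:Int) else 0)
      + 2 * (if cd.1 ≠ new.1 then (1:Int) else 0)
      + (if cd.2.1 ≠ new.2.1 then (1:Int) else 0) := by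
  split_ifs <;> ring

-- head of an insertion: it changes exactly when the new element sorts before the old head
theorem head?_foldl_insertBy {α : Type} (lt : α → α → Bool) :
    ∀ (ps : List α) (acc : List α) (h : α), acc.head? = some h →
      ((ps.foldl (fun a x => PySem.List.insertBy lt x a) acc).head?
        = some (ps.foldl (fun m x => if lt x m then x else m) h)) := by
  intro ps
  induction ps with
  | nil => intro acc h hh; simpa using hh
  | cons x t ih =>
    intro acc h hh
    obtain ⟨tl, rfl⟩ : ∃ tl, acc = h :: tl := by
      cases acc with
      | nil => simp at hh
      | cons a tl =>
        simp only [List.head?_cons, Option.some.injEq] at hh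
        exact ⟨tl, by rw [hh]⟩
    simp only [List.foldl_cons]
    have hins : (PySem.List.insertBy lt x (h :: tl)).head? = some (if lt x h then x else h) := by
      by_cases hx : lt x h <;> simp [PySem.List.insertBy, hx]
    exact ih _ _ hins

-- min? over a nonempty list is the running first-minimum fold
theorem min?_cons_foldl {α : Type} (f : α → Int) :
    ∀ (t : List α) (x : α),
      PySem.List.min? (x :: t) f
        = some (t.foldl (fun m y => if f y < f m then y else m) x) := by
  have aux : ∀ (t : List α) (m : α),
      t.foldl (fun acc y =>
        match acc with
        | none => some y
        | some mm => if f y < f mm then some y else some mm) (some m)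
      = some (t.foldl (fun mm y => if f y < f mm then y else mm) m) := by
    intro t
    induction t with
    | nil => intro m; rfl
    | cons y t ih =>
      intro m
      simp only [List.foldl_cons]
      by_cases h : f y < f m <;> simp [h, ih]
  intro t x
  simpa [PySem.List.min?] using aux t x

-- enumerate of a mapped list
theorem enumerate_map {α β : Type} (g : α → β) :
    ∀ (xs : List α) (s : Int),
      PySem.List.enumerate (xs.map g) s
        = (PySem.List.enumerate xs s).map (fun p => (p.1, g p.2)) := by
  intro xs
  induction xs with
  | nil => intro s; simp [PySem.List.enumerate_nil]
  | cons x t ih => intro s; simp [PySem.List.enumerate_cons, ih]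

-- Core: the lexicographic running minimum over (f x, index) pairs tracks the plain
-- first-minimum of f, and its index looks up that very element in ys.
theorem pv_core (f : Int → Int) :
    ∀ (xs ys : List Int) (x : Int) (i s : Int), 0 ≤ i → i ≤ s →
      PySem.List.pyGet? ys i = some x →
      (∀ t : Nat, (ht : t < xs.length) → PySem.List.pyGet? ys (s + t) = some xs[t]) →
      ∃ j : Int,
        ((PySem.List.enumerate xs s).map (fun p => (f p.2, p.1))).foldl
            (fun m q => if pvLt q m then q else m) (f x, i)
          = (f (xs.foldl (fun m y => if f y < f m then y else m) x), j)
        ∧ PySem.List.pyGet? ys j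
            = some (xs.foldl (fun m y => if f y < f m then y else m) x) := by
  intro xs
  induction xs with
  | nil =>
    intro ys x i s hi his hx _
    exact ⟨i, by simp [PySem.List.enumerate_nil], hx⟩
  | cons y t ih =>
    intro ys x i s hi his hx hlook
    have hstep : pvLt (f y, s) (f x, i) = decide (f y < f x) := by
      simp [pvLt]; omega
    have hy : PySem.List.pyGet? ys s = some y := by
      have := hlook 0 (by simp)
      simpa using this
    have hlook' : ∀ t' : Nat, (ht : t' < t.length) →
        PySem.List.pyGet? ys (s + 1 + t') = some t[t'] := by
      intro t' ht
      have := hlook (t' + 1) (by simpa using Nat.succ_lt_succ ht)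
      simpa [add_assoc, add_comm, add_left_comm] using this
    simp only [PySem.List.enumerate_cons, List.map_cons, List.foldl_cons, hstep]
    by_cases hc : f y < f x
    · simpa [hc] using ih ys y s (s + 1) (by omega) (by omega) hy hlook'
    · simpa [hc] using ih ys x i (s + 1) hi (by omega) hx hlook'

-- ===== VERDICT (by name: the statement is the Claim_ definition above) =====
theorem get_closest_object_spec : Claim_equal_get_closest_object := by
  intro k known_ids _ hpre
  obtain ⟨hk, hne, h0⟩ := hpre
  cases known_ids with
  | nil => exact absurd rfl hne
  | cons a rest =>
    show get_closest_object k (a :: rest) = get_closest_object_alt k (a :: rest)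
    have hfun : (fun p : Int × (Int × Int × Int) =>
          ((0 + (if p.2.1 ≠ (pvGetClassIds k).1 then (1:Int) else 0) * 2
              + (if p.2.2.1 ≠ (pvGetClassIds k).2.1 then (1:Int) else 0) * 1
              + (if p.2.2.2 ≠ (pvGetClassIds k).2.2 then (1:Int) else 0) * 4, p.1) : Int × Int))
        ∘ (fun p : Int × Int => (p.1, pvGetClassIds p.2))
        = fun p : Int × Int => (pvPriorityB (pvGetClassIds k) p.2, p.1) := by
      funext p
      simp only [Function.comp, pvPriorityB]
      exact congrArg (fun z => (z, p.1)) (pvPriority_eq _ _)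
    have hpri : ((PySem.List.enumerate ((a :: rest).map (fun i => pvGetClassIds i)) 0).foldl
          (fun acc (p : Int × (Int × Int × Int)) =>
            acc ++ [(0 + (if p.2.1 ≠ (pvGetClassIds k).1 then (1:Int) else 0) * 2
              + (if p.2.2.1 ≠ (pvGetClassIds k).2.1 then (1:Int) else 0) * 1
              + (if p.2.2.2 ≠ (pvGetClassIds k).2.2 then (1:Int) else 0) * 4, p.1)])
          ([] : List (Int × Int)))
        = (PySem.List.enumerate (a :: rest) 0).map
            (fun p => (pvPriorityB (pvGetClassIds k) p.2, p.1)) := by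
      rw [PySem.List.foldl_append_singleton_eq_map, enumerate_map, List.map_map, hfun]
      simp
    have hlook : ∀ t : Nat, (ht : t < rest.length) →
        PySem.List.pyGet? (a :: rest) ((1 : Int) + t) = some rest[t] := by
      intro t ht
      have hcast : ((1 : Int) + t) = ((t + 1 : Nat) : Int) := by push_cast; ring
      rw [hcast, PySem.List.pyGet?_natCast]
      simp [ht]
    obtain ⟨j, hfold, hjget⟩ := pv_core (pvPriorityB (pvGetClassIds k)) rest (a :: rest) a 0 1
      le_rfl zero_le_one (PySem.List.pyGet?_zero_cons a rest) hlook
    -- A's sorted priority list starts with the lexicographic minimum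
    have hhead : (PySem.List.sorted2
          ((PySem.List.enumerate (a :: rest) 0).map
            (fun p => (pvPriorityB (pvGetClassIds k) p.2, p.1)))
          (fun q => q.1) (fun q => q.2)).head?
        = some (pvPriorityB (pvGetClassIds k)
            (rest.foldl (fun m y => if pvPriorityB (pvGetClassIds k) y
              < pvPriorityB (pvGetClassIds k) m then y else m) a), j) := by
      have h1 : PySem.List.sorted2
            ((PySem.List.enumerate (a :: rest) 0).map
              (fun p => (pvPriorityB (pvGetClassIds k) p.2, p.1)))
            (fun q => q.1) (fun q => q.2)
          = (((PySem.List.enumerate rest 1).map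
              (fun p => (pvPriorityB (pvGetClassIds k) p.2, p.1))).foldl
              (fun acc x => PySem.List.insertBy pvLt x acc)
              [(pvPriorityB (pvGetClassIds k) a, 0)]) := by
        simp only [PySem.List.enumerate_cons, List.map_cons, zero_add]
        rfl
      rw [h1, head?_foldl_insertBy pvLt _ _ (pvPriorityB (pvGetClassIds k) a, 0) rfl, hfold]
    obtain ⟨tl, htl⟩ := List.head?_eq_some_iff.mp hhead
    -- evaluate both ports
    simp only [get_closest_object, get_closest_object_alt, hpri, min?_cons_foldl]
    rw [htl]
    simp [hjget]
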